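-- pv_equiv track=rewrite | github.com/KevinJGV/juan-jose | Campus_Python-master/Alejandro_Mancillla/Matrices/Ventas_Sweetco.py | DiaSemanaMayorVenta
-- ===== SOURCE A (Python) =====
-- def DiaSemanaMayorVenta(Mat, Prec):
--     VSumDia = []
--     for c in range(len(Mat[1])):
--         Sum = 0
--         for f in range(len(Mat)):
--             Sum += Mat[f][c] * Prec[f]
--         VSumDia.append(Sum)
--     return [VSumDia.index(max(VSumDia)) + 1, max(VSumDia)]
-- ===== SOURCE B (Python) =====
-- def DiaSemanaMayorVenta(Mat, Prec):
--     best_idx = None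
--     best_val = None
--     for c in range(len(Mat[1])):
--         s = sum(row[c] * p for row, p in zip(Mat, Prec))
--         if best_val is None or s > best_val:
--             best_idx, best_val = c, s
--     return [best_idx + 1, best_val]
-- ===== Notes on version B (the rewrite author's own statement) =====
-- stated objective: simpler
-- what changed: B replaces the build-a-list-then-rescan-it-three-times structure (append all column sums, then max twice plus index) by a single fold over the columns that keeps a running best value and best index (strict > so the first maximum wins, matching index(max(...))).
import Mathlib
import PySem

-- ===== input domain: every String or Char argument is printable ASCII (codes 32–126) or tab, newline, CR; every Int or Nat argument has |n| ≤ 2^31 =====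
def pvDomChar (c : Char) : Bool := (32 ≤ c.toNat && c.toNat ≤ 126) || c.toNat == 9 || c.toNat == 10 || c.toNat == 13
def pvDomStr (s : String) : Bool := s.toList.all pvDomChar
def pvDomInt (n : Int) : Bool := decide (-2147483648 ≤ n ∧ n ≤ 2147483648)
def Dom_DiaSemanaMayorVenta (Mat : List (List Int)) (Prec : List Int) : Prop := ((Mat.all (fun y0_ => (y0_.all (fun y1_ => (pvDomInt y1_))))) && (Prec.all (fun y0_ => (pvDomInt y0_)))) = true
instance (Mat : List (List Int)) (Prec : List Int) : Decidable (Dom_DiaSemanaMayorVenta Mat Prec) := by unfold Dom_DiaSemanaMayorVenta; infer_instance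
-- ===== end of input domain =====

-- B replaces A's build-a-list-then-rescan structure (append all column sums, then max twice plus
-- index) by a single fold over the columns keeping a running best value/index; objective: simpler.

-- ===== PORT A =====
def DiaSemanaMayorVenta (Mat : List (List Int)) (Prec : List Int) : List Int :=
  let VSumDia : List Int :=
    (PySem.List.pyRange 0 ((PySem.List.pyGetD Mat 1 []).length : Int) 1).foldl
      (fun acc c =>
        let Sum : Int :=
          (PySem.List.pyRange 0 (Mat.length : Int) 1).foldl
            (fun s f => s + (PySem.List.pyGetD (PySem.List.pyGetD Mat f []) c 0) * (PySem.List.pyGetD Prec f 0)) 0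
        acc ++ [Sum]) []
  let mx : Int := (PySem.List.max? VSumDia (fun x => x)).getD 0
  [(((PySem.List.index? VSumDia mx).getD 0 : Nat) : Int) + 1, mx]

-- ===== PORT B =====
def DiaSemanaMayorVenta_alt (Mat : List (List Int)) (Prec : List Int) : List Int :=
  let best : Option (Int × Int) :=
    (PySem.List.pyRange 0 ((PySem.List.pyGetD Mat 1 []).length : Int) 1).foldl
      (fun best c =>
        let s : Int := (Mat.zip Prec).foldl (fun a rp => a + (PySem.List.pyGetD rp.1 c 0) * rp.2) 0
        match best with
        | none => some (c, s)
        | some (bi, bv) => if s > bv then some (c, s) else some (bi, bv)) none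
  match best with
  | none => []        -- unreachable under Pre_ (Source B raises TypeError here, like A's ValueError)
  | some (bi, bv) => [bi + 1, bv]

-- ===== PRECONDITION & SPEC =====
-- Pre_ excludes exactly the inputs on which A raises: fewer than 2 rows (Mat[1] IndexError),
-- an empty row 1 (max([]) ValueError), a row shorter than row 1 (IndexError on Mat[f][c]),
-- or Prec shorter than Mat (IndexError on Prec[f]).
def Pre_DiaSemanaMayorVenta (Mat : List (List Int)) (Prec : List Int) : Prop :=
  2 ≤ Mat.length ∧ Mat.length ≤ Prec.length ∧
  1 ≤ (Mat.getD 1 []).length ∧ ∀ row ∈ Mat, (Mat.getD 1 []).length ≤ row.length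
instance (Mat : List (List Int)) (Prec : List Int) : Decidable (Pre_DiaSemanaMayorVenta Mat Prec) := by
  unfold Pre_DiaSemanaMayorVenta; infer_instance

def pvWitness_DiaSemanaMayorVenta : List (List Int) × List Int := ([[1, 2], [3, 1]], [2, 5])

def Spec_DiaSemanaMayorVenta (Mat : List (List Int)) (Prec : List Int) (out : List Int) : Prop := out = DiaSemanaMayorVenta_alt Mat Prec
instance (Mat : List (List Int)) (Prec : List Int) (out : List Int) : Decidable (Spec_DiaSemanaMayorVenta Mat Prec out) := by unfold Spec_DiaSemanaMayorVenta; infer_instance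

-- ===== CLAIM (what is proved, stated in full; the proofs are below) =====
def Claim_equal_DiaSemanaMayorVenta : Prop := ∀ (Mat : List (List Int)) (Prec : List Int), Dom_DiaSemanaMayorVenta Mat Prec → Pre_DiaSemanaMayorVenta Mat Prec → Spec_DiaSemanaMayorVenta Mat Prec (DiaSemanaMayorVenta Mat Prec)

-- ===== LEMMAS AND PROOFS =====

-- B's running-best loop, written structurally over the list of column sums.
def runBest : List Int → Int → Int × Int → Int × Int
  | [], _, st => st
  | v :: t, k, (bi, bv) => runBest t (k + 1) (if bv < v then (k, v) else (bi, bv))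

theorem runBest_snd (t : List Int) : ∀ (k bi bv : Int), (runBest t k (bi, bv)).2 = t.foldl max bv := by
  induction t with
  | nil => intro k bi bv; simp [runBest]
  | cons v t ih =>
    intro k bi bv
    simp only [runBest, List.foldl_cons]
    by_cases h : bv < v
    · simp [h, ih, max_eq_right h.le]
    · simp [h, ih, max_eq_left (not_lt.mp h)]

theorem runBest_fst (t : List Int) : ∀ (k bi bv : Int),
    (runBest t k (bi, bv)).1 =
      if t.foldl max bv ≤ bv then bi else k + ((t.idxOf (t.foldl max bv) : Nat) : Int) := by
  induction t with
  | nil => intro k bi bv; simp [runBest]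
  | cons v t ih =>
    intro k bi bv
    have hle : bv ≤ t.foldl max bv := (PySem.List.le_foldl_max t bv).1
    simp only [runBest, List.foldl_cons]
    by_cases h : bv < v
    · have hmax : max bv v = v := max_eq_right h.le
      rw [if_pos h, ih, hmax]
      have hv : v ≤ t.foldl max v := (PySem.List.le_foldl_max t v).1
      by_cases h2 : t.foldl max v ≤ v
      · have : t.foldl max v = v := le_antisymm h2 hv
        rw [if_pos h2, if_neg (by omega), this, List.idxOf_cons_self]
        simp
      · rw [if_neg h2, if_neg (by omega)]
        rw [List.idxOf_cons_ne _ (by omega)]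
        push_cast
        ring
    · have hmax : max bv v = bv := max_eq_left (not_lt.mp h)
      rw [if_neg h, ih, hmax]
      by_cases h2 : t.foldl max bv ≤ bv
      · simp [h2]
      · rw [if_neg h2, if_neg h2]
        rw [List.idxOf_cons_ne _ (by omega)]
        push_cast
        ring

-- index-based weighted row sum (A's inner loop) = zip-based weighted row sum (B's)
theorem zipfold_nat (val : List Int → Int) : ∀ (Mat : List (List Int)) (Prec : List Int) (a : Int),
    Mat.length ≤ Prec.length →
    (List.range Mat.length).foldl (fun s f => s + val (Mat.getD f []) * (Prec.getD f 0)) a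
    = (Mat.zip Prec).foldl (fun a rp => a + val rp.1 * rp.2) a := by
  intro Mat
  induction Mat with
  | nil => intro Prec a h; simp
  | cons x xs ih =>
    intro Prec a h
    match Prec with
    | [] => simp at h
    | p :: ps =>
      rw [List.length_cons, List.range_succ_eq_map, List.foldl_cons, List.foldl_map]
      simp only [List.getD_cons_zero, Nat.succ_eq_add_one, List.getD_cons_succ,
        List.zip_cons_cons, List.foldl_cons]
      exact ih ps _ (by simpa using h)

theorem zipfold (val : List Int → Int) (Mat : List (List Int)) (Prec : List Int) (a : Int)
    (h : Mat.length ≤ Prec.length) :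
    (PySem.List.pyRange 0 (Mat.length : Int) 1).foldl
      (fun s f => s + val (PySem.List.pyGetD Mat f []) * (PySem.List.pyGetD Prec f 0)) a
    = (Mat.zip Prec).foldl (fun a rp => a + val rp.1 * rp.2) a := by
  rw [PySem.List.pyRange_one, List.foldl_map]
  simp only [zero_add, Int.sub_zero, Int.toNat_natCast, PySem.List.pyGetD_natCast]
  exact zipfold_nat val Mat Prec a h

-- B's option-state fold over a range, once the state is some, is runBest over the mapped values.
theorem foldB_some (v : Int → Int) : ∀ (n : Nat) (a : Int) (st : Int × Int),
    (PySem.List.pyRange a (a + (n : Int)) 1).foldl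
      (fun best c =>
        match best with
        | none => some (c, v c)
        | some (bi, bv) => if v c > bv then some (c, v c) else some (bi, bv)) (some st)
    = some (runBest ((PySem.List.pyRange a (a + (n : Int)) 1).map v) a st) := by
  intro n
  induction n with
  | zero => intro a st; simp [PySem.List.pyRange_one_eq_nil (by omega : a + (0:Int) ≤ a), runBest]
  | succ n ih =>
    intro a st
    obtain ⟨bi, bv⟩ := st
    rw [show ((n+1 : Nat) : Int) = (n : Int) + 1 from by push_cast; ring]
    rw [PySem.List.pyRange_one_cons (by omega : a < a + ((n:Int) + 1))]
    have harg : a + ((n:Int) + 1) = (a + 1) + (n : Int) := by ring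
    rw [List.foldl_cons, List.map_cons, runBest]
    dsimp only
    by_cases h : v a > bv
    · rw [if_pos h, if_pos (show bv < v a from h), harg, ih]
    · rw [if_neg h, if_neg (show ¬ bv < v a from h), harg, ih]

theorem index?_mem_idxOf (xs : List Int) (v : Int) (h : v ∈ xs) :
    PySem.List.index? xs v = some (xs.idxOf v) := by
  induction xs with
  | nil => simp at h
  | cons x t ih =>
    by_cases hx : x = v
    · subst hx; rw [PySem.List.index?_cons_self, List.idxOf_cons_self]
    · have hv : v ∈ t := by
        rcases List.mem_cons.mp h with h' | h'
        · exact absurd h'.symm hx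
        · exact h'
      rw [PySem.List.index?_cons_of_ne t hx, ih hv, List.idxOf_cons_ne _ (by omega)]
      simp

-- ===== VERDICT (by name: the statement is the Claim_ definition above) =====
theorem DiaSemanaMayorVenta_spec : Claim_equal_DiaSemanaMayorVenta := by
  intro Mat Prec _hdom hpre
  obtain ⟨h2, hP, hm1, _hrows⟩ := hpre
  unfold Spec_DiaSemanaMayorVenta DiaSemanaMayorVenta DiaSemanaMayorVenta_alt
  -- row 1 as both ports see it
  have hrow : PySem.List.pyGetD Mat 1 [] = Mat.getD 1 [] := PySem.List.pyGetD_ofNat' Mat 1 []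
  set m : Nat := (PySem.List.pyGetD Mat 1 []).length with hmdef
  have hm : 1 ≤ m := by rw [hmdef, hrow]; exact hm1
  -- the common column-sum function
  set colSum : Int → Int :=
    fun c => (Mat.zip Prec).foldl (fun a rp => a + (PySem.List.pyGetD rp.1 c 0) * rp.2) 0 with hcs
  -- A's list of column sums is the map of colSum over the columns
  have hinner : ∀ c : Int,
      (PySem.List.pyRange 0 (Mat.length : Int) 1).foldl
        (fun s f => s + (PySem.List.pyGetD (PySem.List.pyGetD Mat f []) c 0) * (PySem.List.pyGetD Prec f 0)) 0
      = colSum c := fun c => zipfold (fun row => PySem.List.pyGetD row c 0) Mat Prec 0 hP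
  rw [PySem.List.foldl_append_singleton_eq_map]
  simp only [hinner, List.nil_append]
  -- split off column 0
  have hcols : PySem.List.pyRange 0 (m : Int) 1 = 0 :: PySem.List.pyRange 1 (m : Int) 1 :=
    PySem.List.pyRange_one_cons (by exact_mod_cast hm)
  rw [hcols, List.map_cons, List.foldl_cons]
  dsimp only
  -- B's fold over the remaining columns
  have hsplit : (m : Int) = 1 + ((m - 1 : Nat) : Int) := by omega
  have hB := foldB_some colSum (m - 1) 1 (0, colSum 0)
  rw [← hsplit] at hB
  rw [hB]
  -- names for the tail and the maximum
  set t : List Int := (PySem.List.pyRange 1 (m : Int) 1).map colSum with ht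
  set v0 : Int := colSum 0 with hv0
  have hv0M : v0 ≤ t.foldl max v0 := (PySem.List.le_foldl_max t v0).1
  rw [PySem.List.max?_id_cons]
  simp only [Option.getD_some]
  rw [runBest_fst, runBest_snd]
  by_cases hcase : t.foldl max v0 ≤ v0
  · have hMv0 : t.foldl max v0 = v0 := le_antisymm hcase hv0M
    rw [if_pos hcase, hMv0, PySem.List.index?_cons_self]
    simp
  · have hMne : v0 ≠ t.foldl max v0 := by omega
    have hMt : t.foldl max v0 ∈ t := by
      rcases PySem.List.foldl_max_mem t v0 with h | h
      · exact absurd h hMne.symm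
      · exact h
    rw [if_neg hcase, PySem.List.index?_cons_of_ne t hMne, index?_mem_idxOf t _ hMt]
    simp only [Option.map_some, Option.getD_some, List.cons.injEq, and_true]
    push_cast
    ring
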